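-- pv_equiv track=rewrite | github.com/andykr1k/NTILC | test.py | collapse_raw_tool_records
-- ===== SOURCE A (Python) =====
-- from typing import Any, Dict, Iterable, List, Mapping, Optional
--
-- def collapse_raw_tool_records(raw_rows: Iterable[Mapping[str, Any]]) -> List[Dict[str, str]]:
--     collapsed: Dict[str, Dict[str, str]] = {}
--     for row in raw_rows:
--         if not isinstance(row, Mapping):
--             continue
--         name = str(row.get("name", "")).strip()
--         if not name:
--             continue
--
--         current = collapsed.get(
--             name,
--             {
--                 "name": name,
--                 "one_line": "",
--                 "invocation": "",
--             },
--         )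
--         one_line = str(row.get("one_line", "") or "").strip()
--         invocation = str(row.get("invocation", "") or "").strip()
--
--         if len(one_line) > len(current["one_line"]):
--             current["one_line"] = one_line
--         if len(invocation) > len(current["invocation"]):
--             current["invocation"] = invocation
--
--         collapsed[name] = current
--
--     return [collapsed[name] for name in sorted(collapsed.keys())]
-- ===== SOURCE B (Python) =====
-- from typing import Any, Dict, Iterable, List, Mapping
--
--
-- def collapse_raw_tool_records(raw_rows):
--     # Group-then-reduce: first build per-name lists of all stripped values,
--     # then pick the first-longest of each group (max with key=len) per sorted name.
--     groups: Dict[str, tuple] = {}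
--     for row in raw_rows:
--         if not isinstance(row, Mapping):
--             continue
--         name = str(row.get("name", "")).strip()
--         if not name:
--             continue
--         ones, invs = groups.setdefault(name, ([], []))
--         ones.append(str(row.get("one_line", "") or "").strip())
--         invs.append(str(row.get("invocation", "") or "").strip())
--     return [
--         {
--             "name": name,
--             "one_line": max(groups[name][0], key=len),
--             "invocation": max(groups[name][1], key=len),
--         }
--         for name in sorted(groups)
--     ]
-- ===== Notes on version B (the rewrite author's own statement) =====
-- stated objective: alternative
-- what changed: Replaces A's online running-max aggregation (one mutable record per name updated in place) by a two-phase group-then-reduce: first collect every stripped one_line/invocation value per name, then emit max(..., key=len) of each group for the sorted names.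
import Mathlib
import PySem

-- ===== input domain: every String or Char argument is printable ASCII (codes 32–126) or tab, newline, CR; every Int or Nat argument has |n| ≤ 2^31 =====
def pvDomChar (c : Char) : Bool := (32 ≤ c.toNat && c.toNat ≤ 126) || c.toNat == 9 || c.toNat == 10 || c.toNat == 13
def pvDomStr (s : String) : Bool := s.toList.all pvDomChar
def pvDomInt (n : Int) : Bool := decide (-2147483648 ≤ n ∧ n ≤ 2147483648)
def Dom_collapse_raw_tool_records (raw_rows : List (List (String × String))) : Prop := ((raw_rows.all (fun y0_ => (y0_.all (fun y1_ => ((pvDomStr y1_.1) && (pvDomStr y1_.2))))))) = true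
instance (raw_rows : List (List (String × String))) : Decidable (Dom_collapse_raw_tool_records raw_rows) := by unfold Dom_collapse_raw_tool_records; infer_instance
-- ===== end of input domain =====

-- B replaces A's per-name running-max record with a group-then-reduce pass (collect all values per
-- name, then take the first-longest of each group); equal return values, objective: alternative.

-- ===== PORT A =====
-- Rows are dicts with String values in this domain, so str(...) and 'or ""' are the identity;
-- row.get(k, "") is (PySem.Dict.mk row).getD k ""; current["one_line"]/["invocation"] always have
-- their keys (the record is built with them), ported as .getD _ "" (identical value).
def collapse_raw_tool_records (raw_rows : List (List (String × String))) : List (List (String × String)) :=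
  let collapsed : PySem.Dict String (PySem.Dict String String) :=
    raw_rows.foldl (fun collapsed row =>
      let name := PySem.Str.strip ((PySem.Dict.mk row).getD "name" "")
      if name = "" then collapsed
      else
        let current := collapsed.getD name
          (PySem.Dict.mk [("name", name), ("one_line", ""), ("invocation", "")])
        let one_line := PySem.Str.strip ((PySem.Dict.mk row).getD "one_line" "")
        let invocation := PySem.Str.strip ((PySem.Dict.mk row).getD "invocation" "")
        let current :=
          if PySem.Str.len one_line > PySem.Str.len (current.getD "one_line" "") then
            current.insert "one_line" one_line
          else current
        let current :=
          if PySem.Str.len invocation > PySem.Str.len (current.getD "invocation" "") then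
            current.insert "invocation" invocation
          else current
        collapsed.insert name current)
      PySem.Dict.empty
  (PySem.List.sorted collapsed.keys (fun k => k) false).map
    (fun name => (collapsed.getD name PySem.Dict.empty).items)

-- ===== PORT B =====
-- groups.setdefault + the two in-place list appends is ported as one insert of the extended pair;
-- groups[name] in the comprehension always finds its key, ported as .getD name ([], []);
-- max(xs, key=len) is PySem.List.max? xs PySem.Str.len (first-longest element).
def collapse_raw_tool_records_alt (raw_rows : List (List (String × String))) : List (List (String × String)) :=
  let groups : PySem.Dict String (List String × List String) :=
    raw_rows.foldl (fun groups row =>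
      let name := PySem.Str.strip ((PySem.Dict.mk row).getD "name" "")
      if name = "" then groups
      else
        let one_line := PySem.Str.strip ((PySem.Dict.mk row).getD "one_line" "")
        let invocation := PySem.Str.strip ((PySem.Dict.mk row).getD "invocation" "")
        let p := groups.getD name ([], [])
        groups.insert name (p.1 ++ [one_line], p.2 ++ [invocation]))
      PySem.Dict.empty
  (PySem.List.sorted groups.keys (fun k => k) false).map
    (fun name =>
      let p := groups.getD name ([], [])
      [("name", name),
       ("one_line", (PySem.List.max? p.1 PySem.Str.len).getD ""),
       ("invocation", (PySem.List.max? p.2 PySem.Str.len).getD "")])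

-- ===== PRECONDITION & SPEC =====
def Spec_collapse_raw_tool_records (raw_rows : List (List (String × String))) (out : List (List (String × String))) : Prop := out = collapse_raw_tool_records_alt raw_rows
instance (raw_rows : List (List (String × String))) (out : List (List (String × String))) : Decidable (Spec_collapse_raw_tool_records raw_rows out) := by unfold Spec_collapse_raw_tool_records; infer_instance

-- ===== CLAIM (what is proved, stated in full; the proofs are below) =====
def Claim_equal_collapse_raw_tool_records : Prop := ∀ (raw_rows : List (List (String × String))), Dom_collapse_raw_tool_records raw_rows → Spec_collapse_raw_tool_records raw_rows (collapse_raw_tool_records raw_rows)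

-- ===== LEMMAS AND PROOFS =====

-- the record A keeps for a name, expressed from B's group for that name
def pvVal (n : String) (p : List String × List String) : PySem.Dict String String :=
  PySem.Dict.mk [("name", n),
    ("one_line", (PySem.List.max? p.1 PySem.Str.len).getD ""),
    ("invocation", (PySem.List.max? p.2 PySem.Str.len).getD "")]

-- loop invariant: A's dict and B's dict have the same keys (same order) and pointwise pvVal-related values
def pvInv (cA : PySem.Dict String (PySem.Dict String String))
    (gB : PySem.Dict String (List String × List String)) : Prop :=
  cA.keys = gB.keys ∧ ∀ n, cA.get? n = (gB.get? n).map (pvVal n)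

theorem pv_len_zero {s : String} (h : PySem.Str.len s = 0) : s = "" := by
  have h2 : s.toList = [] := by
    have hl := PySem.Str.len_eq s
    rw [h] at hl
    exact List.length_eq_zero_iff.mp (by exact_mod_cast hl.symm)
  exact String.toList_eq_nil_iff.mp h2

theorem pv_max_append (L : List String) (x : String) :
    ((PySem.List.max? (L ++ [x]) PySem.Str.len).getD "") =
      if PySem.Str.len x > PySem.Str.len ((PySem.List.max? L PySem.Str.len).getD "") then x
      else (PySem.List.max? L PySem.Str.len).getD "" := by
  unfold PySem.List.max?
  rw [List.foldl_append]
  generalize List.foldl _ none L = acc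
  cases acc with
  | none =>
    simp only [List.foldl_cons, List.foldl_nil, Option.getD_some, Option.getD_none, gt_iff_lt]
    by_cases hx : PySem.Str.len "" < PySem.Str.len x
    · rw [if_pos hx]
    · rw [if_neg hx]
      have h0 : PySem.Str.len "" = 0 := by decide
      have hnn : (0:Int) ≤ PySem.Str.len x := by rw [PySem.Str.len_eq]; positivity
      have hx0 : PySem.Str.len x = 0 := by omega
      exact pv_len_zero hx0
  | some m =>
    simp only [List.foldl_cons, List.foldl_nil, Option.getD_some, gt_iff_lt]
    by_cases h : PySem.Str.len m < PySem.Str.len x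
    · rw [if_pos h, if_pos h, Option.getD_some]
    · rw [if_neg h, if_neg h, Option.getD_some]

-- one row's update of A's record matches appending the row's values to B's group
theorem pv_step_val (n one inv : String) (p : List String × List String) :
    (if PySem.Str.len inv > PySem.Str.len
          ((if PySem.Str.len one > PySem.Str.len ((pvVal n p).getD "one_line" "") then
              (pvVal n p).insert "one_line" one
            else pvVal n p).getD "invocation" "") then
      (if PySem.Str.len one > PySem.Str.len ((pvVal n p).getD "one_line" "") then
          (pvVal n p).insert "one_line" one
        else pvVal n p).insert "invocation" inv
    else
      if PySem.Str.len one > PySem.Str.len ((pvVal n p).getD "one_line" "") then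
        (pvVal n p).insert "one_line" one
      else pvVal n p) = pvVal n (p.1 ++ [one], p.2 ++ [inv]) := by
  unfold pvVal
  rw [pv_max_append p.1 one, pv_max_append p.2 inv]
  generalize (PySem.List.max? p.1 PySem.Str.len).getD "" = m1
  generalize (PySem.List.max? p.2 PySem.Str.len).getD "" = m2
  simp only [PySem.Dict.getD, PySem.Dict.get?, PySem.Dict.insert, PySem.Dict.contains]
  split_ifs <;>
    simp_all <;>
    omega

theorem pv_inv_step (row : List (String × String))
    (cA : PySem.Dict String (PySem.Dict String String))
    (gB : PySem.Dict String (List String × List String))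
    (h : pvInv cA gB) :
    pvInv
      ((fun collapsed row =>
        let name := PySem.Str.strip ((PySem.Dict.mk row).getD "name" "")
        if name = "" then collapsed
        else
          let current := collapsed.getD name
            (PySem.Dict.mk [("name", name), ("one_line", ""), ("invocation", "")])
          let one_line := PySem.Str.strip ((PySem.Dict.mk row).getD "one_line" "")
          let invocation := PySem.Str.strip ((PySem.Dict.mk row).getD "invocation" "")
          let current :=
            if PySem.Str.len one_line > PySem.Str.len (current.getD "one_line" "") then
              current.insert "one_line" one_line
            else current
          let current :=
            if PySem.Str.len invocation > PySem.Str.len (current.getD "invocation" "") then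
              current.insert "invocation" invocation
            else current
          collapsed.insert name current) cA row)
      ((fun groups row =>
        let name := PySem.Str.strip ((PySem.Dict.mk row).getD "name" "")
        if name = "" then groups
        else
          let one_line := PySem.Str.strip ((PySem.Dict.mk row).getD "one_line" "")
          let invocation := PySem.Str.strip ((PySem.Dict.mk row).getD "invocation" "")
          let p := groups.getD name ([], [])
          groups.insert name (p.1 ++ [one_line], p.2 ++ [invocation])) gB row) := by
  obtain ⟨hk, hg⟩ := h
  by_cases h0 : PySem.Str.strip ((PySem.Dict.mk row).getD "name" "") = ""
  · simpa [h0] using And.intro hk hg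
  · simp only [if_neg h0]
    set name := PySem.Str.strip ((PySem.Dict.mk row).getD "name" "") with hname
    set one := PySem.Str.strip ((PySem.Dict.mk row).getD "one_line" "") with hone
    set inv := PySem.Str.strip ((PySem.Dict.mk row).getD "invocation" "") with hinv
    set p := gB.getD name ([], []) with hp
    have hcur : cA.getD name
        (PySem.Dict.mk [("name", name), ("one_line", ""), ("invocation", "")]) = pvVal name p := by
      cases hgn : gB.get? name with
      | none =>
        have hA := hg name
        rw [hgn] at hA
        rw [PySem.Dict.getD_eq_get?_getD, hA]
        have hpe : p = ([], []) := by
          rw [hp, PySem.Dict.getD_eq_get?_getD, hgn]; rfl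
        rw [hpe]
        rfl
      | some q =>
        have hA := hg name
        rw [hgn] at hA
        rw [PySem.Dict.getD_eq_get?_getD, hA]
        have hpe : p = q := by
          rw [hp, PySem.Dict.getD_eq_get?_getD, hgn]; rfl
        rw [hpe]
        rfl
    rw [hcur, pv_step_val name one inv p]
    constructor
    · -- keys
      have hc : cA.contains name = gB.contains name := by
        rw [PySem.Dict.contains_eq_decide_mem_keys, PySem.Dict.contains_eq_decide_mem_keys, hk]
      by_cases hmem : gB.contains name = true
      · rw [PySem.Dict.keys_insert_of_contains _ _ (hc.trans hmem),
            PySem.Dict.keys_insert_of_contains _ _ hmem, hk]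
      · have hf : gB.contains name = false := by simpa using hmem
        rw [PySem.Dict.keys_insert_of_not_contains _ _ (hc.trans hf),
            PySem.Dict.keys_insert_of_not_contains _ _ hf, hk]
    · -- values
      intro m
      rw [PySem.Dict.get?_insert, PySem.Dict.get?_insert]
      by_cases hm : m = name
      · subst hm
        rw [if_pos rfl, if_pos rfl]
        rfl
      · rw [if_neg hm, if_neg hm]
        exact hg m

theorem pv_inv_fold (rows : List (List (String × String))) :
    ∀ (cA : PySem.Dict String (PySem.Dict String String))
      (gB : PySem.Dict String (List String × List String)),
      pvInv cA gB →
      pvInv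
        (rows.foldl (fun collapsed row =>
          let name := PySem.Str.strip ((PySem.Dict.mk row).getD "name" "")
          if name = "" then collapsed
          else
            let current := collapsed.getD name
              (PySem.Dict.mk [("name", name), ("one_line", ""), ("invocation", "")])
            let one_line := PySem.Str.strip ((PySem.Dict.mk row).getD "one_line" "")
            let invocation := PySem.Str.strip ((PySem.Dict.mk row).getD "invocation" "")
            let current :=
              if PySem.Str.len one_line > PySem.Str.len (current.getD "one_line" "") then
                current.insert "one_line" one_line
              else current
            let current :=
              if PySem.Str.len invocation > PySem.Str.len (current.getD "invocation" "") then
                current.insert "invocation" invocation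
              else current
            collapsed.insert name current) cA)
        (rows.foldl (fun groups row =>
          let name := PySem.Str.strip ((PySem.Dict.mk row).getD "name" "")
          if name = "" then groups
          else
            let one_line := PySem.Str.strip ((PySem.Dict.mk row).getD "one_line" "")
            let invocation := PySem.Str.strip ((PySem.Dict.mk row).getD "invocation" "")
            let p := groups.getD name ([], [])
            groups.insert name (p.1 ++ [one_line], p.2 ++ [invocation])) gB) := by
  induction rows with
  | nil => intro cA gB h; exact h
  | cons r rs ih =>
    intro cA gB h
    simp only [List.foldl_cons]
    exact ih _ _ (pv_inv_step r cA gB h)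

theorem pv_final (cF : PySem.Dict String (PySem.Dict String String))
    (gF : PySem.Dict String (List String × List String)) (h : pvInv cF gF) :
    (PySem.List.sorted cF.keys (fun k => k) false).map
      (fun name => (cF.getD name PySem.Dict.empty).items) =
    (PySem.List.sorted gF.keys (fun k => k) false).map
      (fun name =>
        [("name", name),
         ("one_line", (PySem.List.max? (gF.getD name ([], [])).1 PySem.Str.len).getD ""),
         ("invocation", (PySem.List.max? (gF.getD name ([], [])).2 PySem.Str.len).getD "")]) := by
  obtain ⟨hk, hg⟩ := h
  rw [hk]
  apply List.map_congr_left
  intro n hn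
  have hmem : n ∈ gF.keys := (PySem.List.mem_sorted _ _ _ _).mp hn
  cases hq : gF.get? n with
  | none => exact absurd ((PySem.Dict.get?_eq_none_iff_not_mem_keys _ _).mp hq) (not_not_intro hmem)
  | some q =>
    have hA := hg n
    rw [hq] at hA
    rw [PySem.Dict.getD_eq_get?_getD, hA, PySem.Dict.getD_eq_get?_getD, hq]
    rfl

-- ===== VERDICT (by name: the statement is the Claim_ definition above) =====
theorem collapse_raw_tool_records_spec : Claim_equal_collapse_raw_tool_records := by
  intro raw_rows _
  unfold Spec_collapse_raw_tool_records collapse_raw_tool_records collapse_raw_tool_records_alt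
  exact pv_final _ _ (pv_inv_fold raw_rows PySem.Dict.empty PySem.Dict.empty
    ⟨rfl, fun n => by simp⟩)
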